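-- pv_equiv track=rewrite | github.com/jebickson/IDLE20 | tonguetwister.py | is_tongue_twister
-- ===== SOURCE A (Python) =====
-- def is_tongue_twister(paragraph, anchor_letter):
--     words = paragraph.split()
--     anchor_words = [word for word in words if word.lower().startswith(anchor_letter.lower())]
--
--     # Check conditions
--     if len(anchor_words) < 7:
--         return "Inappropriate Entry"
--     if len(anchor_words) > 20:
--         return "Inappropriate Entry"
--     for i in range(1, len(anchor_words)):
--         if anchor_words[i].lower() == anchor_words[i - 1].lower():
--             return "Inappropriate Entry"
--
--     return "Good Tongue Twister"
-- ===== SOURCE B (Python) =====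
-- def is_tongue_twister(paragraph, anchor_letter):
--     al = anchor_letter.lower()
--
--     # Divide-and-conquer summary of a nonempty word list:
--     # (anchor count, first anchor lowercased, last anchor lowercased, adjacent-duplicate flag)
--     def summarize(words):
--         if len(words) == 1:
--             lw = words[0].lower()
--             if lw.startswith(al):
--                 return (1, lw, lw, False)
--             return (0, None, None, False)
--         mid = len(words) // 2
--         c1, f1, l1, d1 = summarize(words[:mid])
--         c2, f2, l2, d2 = summarize(words[mid:])
--         dup = d1 or d2 or (l1 is not None and l1 == f2)
--         first = f1 if f1 is not None else f2
--         last = l2 if l2 is not None else l1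
--         return (c1 + c2, first, last, dup)
--
--     words = paragraph.split()
--     if words:
--         count, _, _, dup = summarize(words)
--     else:
--         count, dup = 0, False
--     if count < 7 or count > 20 or dup:
--         return "Inappropriate Entry"
--     return "Good Tongue Twister"
-- ===== Notes on version B (the rewrite author's own statement) =====
-- stated objective: alternative
-- what changed: Replaces A's filter-then-index-scan with a divide-and-conquer that recursively splits the word list in half and merges (count, first anchor, last anchor, duplicate flag) summaries, detecting adjacent duplicates at the seam of the two halves instead of scanning a filtered list.
import Mathlib
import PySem

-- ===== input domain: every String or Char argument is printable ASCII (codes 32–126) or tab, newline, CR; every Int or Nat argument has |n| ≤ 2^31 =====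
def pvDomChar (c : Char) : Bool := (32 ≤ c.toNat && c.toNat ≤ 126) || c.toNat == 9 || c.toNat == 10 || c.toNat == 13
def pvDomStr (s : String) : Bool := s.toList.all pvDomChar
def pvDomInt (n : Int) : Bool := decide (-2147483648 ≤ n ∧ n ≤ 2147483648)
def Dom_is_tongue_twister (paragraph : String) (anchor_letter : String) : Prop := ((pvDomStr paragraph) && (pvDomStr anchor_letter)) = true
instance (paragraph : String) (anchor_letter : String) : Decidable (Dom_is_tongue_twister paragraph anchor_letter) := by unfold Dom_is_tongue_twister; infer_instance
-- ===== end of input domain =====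

-- B replaces A's filter-then-adjacent-index-scan with a divide-and-conquer that merges
-- (count, first anchor, last anchor, duplicate flag) summaries of the two halves (alternative algorithm).


-- ===== PORT A =====
-- A's 'for i in range(1, len(anchor_words)): if aw[i].lower() == aw[i-1].lower(): return ...'
-- as structural recursion on the pyRange list; the _ , _ arm is unreachable (indices are in range).
def ttScanA (aw : List String) : List Int → Bool
  | [] => false
  | i :: rest =>
    match PySem.List.pyGet? aw i, PySem.List.pyGet? aw (i - 1) with
    | some wi, some wp =>
      if PySem.Str.lower wi = PySem.Str.lower wp then true else ttScanA aw rest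
    | _, _ => false

def is_tongue_twister (paragraph : String) (anchor_letter : String) : String :=
  let words := PySem.Str.split₀ paragraph
  let anchor_words := words.filter
    (fun word => PySem.Str.startswith (PySem.Str.lower word) (PySem.Str.lower anchor_letter))
  if anchor_words.length < 7 then "Inappropriate Entry"
  else if anchor_words.length > 20 then "Inappropriate Entry"
  else if ttScanA anchor_words (PySem.List.pyRange 1 (anchor_words.length : Int) 1) then
    "Inappropriate Entry"
  else "Good Tongue Twister"

-- ===== PORT B =====
-- summary of a half: (anchor count, first anchor lowercased, last anchor lowercased, adjacent-dup flag)
def ttCombine (L R : Nat × Option String × Option String × Bool) :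
    Nat × Option String × Option String × Bool :=
  let dup := L.2.2.2 || R.2.2.2 ||
    (match L.2.2.1, R.2.1 with | some x, some y => x == y | _, _ => false)
  (L.1 + R.1, L.2.1.or R.2.1, (R.2.2.1).or L.2.2.1, dup)

-- Source B's summarize; the [] arm is a totality guard only (Python never calls summarize on []).
def ttSum (al : String) (ws : List String) : Nat × Option String × Option String × Bool :=
  match ws with
  | [] => (0, none, none, false)
  | [w] =>
    let lw := PySem.Str.lower w
    if PySem.Str.startswith lw al then (1, some lw, some lw, false) else (0, none, none, false)
  | w1 :: w2 :: rest =>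
    let l := (w1 :: w2 :: rest)
    let mid := l.length / 2
    ttCombine (ttSum al (l.take mid)) (ttSum al (l.drop mid))
termination_by ws.length
decreasing_by
  · simp only [List.length_take, List.length_cons]; omega
  · simp only [List.length_drop, List.length_cons]; omega

def is_tongue_twister_alt (paragraph : String) (anchor_letter : String) : String :=
  let al := PySem.Str.lower anchor_letter
  let words := PySem.Str.split₀ paragraph
  let cd : Nat × Bool :=
    if words.isEmpty then (0, false)
    else (let s := ttSum al words; (s.1, s.2.2.2))
  if cd.1 < 7 || 20 < cd.1 || cd.2 then "Inappropriate Entry"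
  else "Good Tongue Twister"

-- ===== PRECONDITION & SPEC =====
def Spec_is_tongue_twister (paragraph : String) (anchor_letter : String) (out : String) : Prop := out = is_tongue_twister_alt paragraph anchor_letter
instance (paragraph : String) (anchor_letter : String) (out : String) : Decidable (Spec_is_tongue_twister paragraph anchor_letter out) := by unfold Spec_is_tongue_twister; infer_instance

-- ===== CLAIM (what is proved, stated in full; the proofs are below) =====
def Claim_equal_is_tongue_twister : Prop := ∀ (paragraph : String) (anchor_letter : String), Dom_is_tongue_twister paragraph anchor_letter → Spec_is_tongue_twister paragraph anchor_letter (is_tongue_twister paragraph anchor_letter)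

-- ===== LEMMAS AND PROOFS =====

-- adjacent duplicate in a list of (already lowercased) strings
def adjDup : List String → Bool
  | [] => false
  | [_] => false
  | x :: y :: r => (x == y) || adjDup (y :: r)

-- the lowercased anchor words of a word list
def lowAnchor (al : String) (ws : List String) : List String :=
  (ws.filter (fun w => PySem.Str.startswith (PySem.Str.lower w) al)).map PySem.Str.lower

-- the summary a correct summarize must return for word list with anchor list l
def ttQuad (l : List String) : Nat × Option String × Option String × Bool :=
  (l.length, l.head?, l.getLast?, adjDup l)

theorem adjDup_append : ∀ (a b : List String),
    adjDup (a ++ b) =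
      (adjDup a || adjDup b ||
        (match a.getLast?, b.head? with | some x, some y => x == y | _, _ => false)) := by
  intro a
  induction a with
  | nil => intro b; simp [adjDup]
  | cons x r ih =>
    intro b
    cases r with
    | nil =>
      cases b with
      | nil => simp [adjDup]
      | cons y s => simp [adjDup, List.getLast?_singleton, Bool.or_comm]
    | cons y s =>
      have h1 : (x :: y :: s) ++ b = x :: ((y :: s) ++ b) := by simp
      have h2 : (x :: y :: s).getLast? = (y :: s).getLast? := by
        simp [List.getLast?_cons_cons]
      rw [h1]
      have h3 : adjDup (x :: ((y :: s) ++ b)) = ((x == y) || adjDup ((y :: s) ++ b)) := by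
        simp [adjDup]
      rw [h3, ih, h2]
      simp [adjDup, Bool.or_assoc]

theorem ttQuad_append (a b : List String) :
    ttQuad (a ++ b) = ttCombine (ttQuad a) (ttQuad b) := by
  simp only [ttQuad, ttCombine, Prod.mk.injEq, List.length_append, List.head?_append,
    adjDup_append]
  refine ⟨trivial, trivial, ?_, trivial⟩
  cases b with
  | nil => simp
  | cons y s => simp

theorem lowAnchor_append (al : String) (a b : List String) :
    lowAnchor al (a ++ b) = lowAnchor al a ++ lowAnchor al b := by
  simp [lowAnchor]

theorem ttSum_eq (al : String) (ws : List String) :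
    ttSum al ws = ttQuad (lowAnchor al ws) := by
  induction ws using ttSum.induct al with
  | case1 => simp [ttSum, lowAnchor, ttQuad, adjDup]
  | case2 w _ =>
    simp only [ttSum, lowAnchor, List.filter_cons, List.filter_nil]
    split_ifs <;> simp [ttQuad, adjDup]
  | case3 w _ =>
    simp only [ttSum, lowAnchor, List.filter_cons, List.filter_nil]
    split_ifs <;> simp [ttQuad, adjDup]
  | case4 w1 w2 rest _l _mid ih1 ih2 =>
    rw [ttSum]
    rw [ih1, ih2, ← ttQuad_append, ← lowAnchor_append, List.take_append_drop]

-- ===== A-side characterisation (from the index scan to adjDup) =====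

-- whether (prev, aw…) lowercased contains an adjacent duplicate, prev already lowered
def adjB : Option String → List String → Bool
  | _, [] => false
  | pv, w :: r => (pv == some (PySem.Str.lower w)) || adjB (some (PySem.Str.lower w)) r

theorem ttScanA_char :
    ∀ (rest pre : List String) (w : String),
      ttScanA ((pre ++ [w]) ++ rest)
          (PySem.List.pyRange ((pre.length + 1 : Nat) : Int)
            ((pre.length + 1 + rest.length : Nat) : Int) 1) =
        adjB (some (PySem.Str.lower w)) rest := by
  intro rest
  induction rest with
  | nil =>
    intro pre w
    rw [PySem.List.pyRange_one_eq_nil (by simp only [List.length_nil]; omega)]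
    rfl
  | cons v r ih =>
    intro pre w
    rw [PySem.List.pyRange_one_cons (by simp only [List.length_cons]; omega)]
    have hv : PySem.List.pyGet? ((pre ++ [w]) ++ v :: r) ((pre.length + 1 : Nat) : Int)
        = some v := by
      have h : ((pre.length + 1 : Nat) : Int) = (((pre ++ [w]).length : Nat) : Int) := by simp
      rw [h, PySem.List.pyGet?_append_length]
    have hw : PySem.List.pyGet? ((pre ++ [w]) ++ v :: r) (((pre.length + 1 : Nat) : Int) - 1)
        = some w := by
      have h1 : (pre ++ [w]) ++ v :: r = pre ++ w :: (v :: r) := by simp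
      have h2 : (((pre.length + 1 : Nat) : Int) - 1) = ((pre.length : Nat) : Int) := by
        push_cast; ring
      rw [h1, h2, PySem.List.pyGet?_append_length]
    simp only [ttScanA, hv, hw]
    by_cases h : PySem.Str.lower v = PySem.Str.lower w
    · rw [if_pos h]
      simp [adjB, h]
    · rw [if_neg h]
      have hne : ¬ (PySem.Str.lower w = PySem.Str.lower v) := fun hh => h hh.symm
      have harr : (pre ++ [w]) ++ v :: r = ((pre ++ [w]) ++ [v]) ++ r := by simp
      have hlen1 : ((pre.length + 1 : Nat) : Int) + 1
          = (((pre ++ [w]).length + 1 : Nat) : Int) := by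
        simp only [List.length_append, List.length_cons, List.length_nil]; omega
      have hlen2 : ((pre.length + 1 + (v :: r).length : Nat) : Int)
          = (((pre ++ [w]).length + 1 + r.length : Nat) : Int) := by
        simp only [List.length_append, List.length_cons, List.length_nil]; omega
      rw [harr, hlen1, hlen2, ih (pre ++ [w]) v]
      simp [adjB, hne]

theorem ttScanA_eq_adjB (aw : List String) :
    ttScanA aw (PySem.List.pyRange 1 (aw.length : Int) 1) = adjB none aw := by
  cases aw with
  | nil => rfl
  | cons w rest =>
    have h := ttScanA_char rest [] w
    simp only [List.nil_append, List.singleton_append, List.length_nil, Nat.zero_add,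
      Nat.cast_one, Nat.cast_add] at h
    have hl : ((w :: rest).length : Int) = (1 : Int) + (rest.length : Int) := by
      simp only [List.length_cons]; omega
    rw [hl, h]
    simp [adjB]

theorem adjB_some_eq_adjDup :
    ∀ (l : List String) (x : String),
      adjB (some x) l = adjDup (x :: l.map PySem.Str.lower) := by
  intro l
  induction l with
  | nil => intro x; simp [adjB, adjDup]
  | cons w r ih =>
    intro x
    simp only [adjB, List.map_cons, adjDup, ih]
    simp

theorem adjB_none_eq_adjDup (l : List String) :
    adjB none l = adjDup (l.map PySem.Str.lower) := by
  cases l with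
  | nil => rfl
  | cons w r =>
    simp only [adjB, List.map_cons, adjB_some_eq_adjDup]
    simp

-- ===== VERDICT (by name: the statement is the Claim_ definition above) =====
theorem is_tongue_twister_spec : Claim_equal_is_tongue_twister := by
  intro paragraph anchor_letter _
  simp only [Spec_is_tongue_twister, is_tongue_twister, is_tongue_twister_alt]
  rw [ttScanA_eq_adjB, adjB_none_eq_adjDup]
  cases hsp : PySem.Str.split₀ paragraph with
  | nil => norm_num
  | cons a r =>
    simp only [ttSum_eq, ttQuad, lowAnchor, List.length_map, List.isEmpty_cons]
    set aw := (a :: r).filter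
      (fun w => PySem.Str.startswith (PySem.Str.lower w) (PySem.Str.lower anchor_letter)) with haw
    by_cases h7 : aw.length < 7
    · simp [h7]
    · by_cases h20 : aw.length > 20
      · simp [h7, h20]
      · cases hadj : adjDup (aw.map PySem.Str.lower) <;> simp [h7, h20]
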